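-- pv_equiv track=rewrite | github.com/baoxingsong/dCNS | scripts/extractInterGeneticSequence/kmer_cluster_CNS.py | seqToNewtokens
-- ===== SOURCE A (Python) =====
-- def split_len(seq, kmerlength):
--     return [''.join(x) for x in zip(*[list(seq[z::kmerlength]) for z in range(kmerlength)])]
--
-- def seqToNewtokens(line, kmerIndexMap, kmersize):
--     line = str.lower(line)
--     if len(line) > 0:
--         sentences = [ ]
--         kmerlist = split_len(line, kmersize)
--         for kmer in kmerlist:
--             if "n" not in kmer:
--                 sentences.append(kmerIndexMap.get(kmer))
--         for n in range(1,kmersize):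
--             kmerlist = split_len(line[n:], kmersize)
--             for kmer in kmerlist:
--                 if "n" not in kmer:
--                     sentences.append(kmerIndexMap.get(kmer))
--     if not sentences:
--         return "" #empty string
--     else:
--         return " ".join(sentences) #newtokens separated with spaces
-- ===== SOURCE B (Python) =====
-- def seqToNewtokens(line, kmerIndexMap, kmersize):
--     line = line.lower()
--     if len(line) > 0:
--         sentences = []
--         if kmersize >= 1:
--             # one sliding-window pass; bucket by frame (start index mod kmersize)
--             buckets = [[] for _ in range(kmersize)]
--             for i in range(len(line) - kmersize + 1):
--                 kmer = line[i:i + kmersize]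
--                 if "n" not in kmer:
--                     buckets[i % kmersize].append(kmerIndexMap.get(kmer))
--             for bucket in buckets:
--                 sentences.extend(bucket)
--     if not sentences:
--         return ""
--     else:
--         return " ".join(sentences)
-- ===== Notes on version B (the rewrite author's own statement) =====
-- stated objective: alternative
-- what changed: A tokenizes with k separate strided split_len/zip passes (one per reading frame); B makes one sliding-window pass over all start positions, buckets each kmer's token by start index mod kmersize, and flattens the buckets, which reproduces A's frame-major order.
import Mathlib
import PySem

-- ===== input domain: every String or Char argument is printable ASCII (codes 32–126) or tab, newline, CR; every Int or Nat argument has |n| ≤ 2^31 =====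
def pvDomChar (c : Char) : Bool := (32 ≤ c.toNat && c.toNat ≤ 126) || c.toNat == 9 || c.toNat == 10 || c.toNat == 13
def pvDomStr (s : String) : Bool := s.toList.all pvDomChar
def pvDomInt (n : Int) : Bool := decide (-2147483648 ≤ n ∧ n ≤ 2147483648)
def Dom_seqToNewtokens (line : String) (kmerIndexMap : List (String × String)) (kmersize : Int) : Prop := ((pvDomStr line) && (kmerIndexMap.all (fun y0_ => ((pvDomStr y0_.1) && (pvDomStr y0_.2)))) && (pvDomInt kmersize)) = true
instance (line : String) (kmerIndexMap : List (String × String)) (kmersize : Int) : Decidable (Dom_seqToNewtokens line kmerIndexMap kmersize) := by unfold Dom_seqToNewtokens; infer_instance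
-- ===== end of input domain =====

-- B replaces A's k separate strided split_len/zip passes with one sliding-window pass
-- that buckets tokens by start-index mod kmersize and flattens the buckets (alternative decomposition, same cost).


-- ===== PORT A =====

-- hand port of the extended slice seq[z::k]: exact for 0 ≤ z and 1 ≤ k, the only values
-- split_len ever uses (z ranges over range(kmerlength), which is empty unless kmerlength ≥ 1)
def pvEveryK : List Char → Nat → List Char
  | [], _ => []
  | c :: rest, k => c :: pvEveryK (rest.drop (k - 1)) k
  termination_by l _ => l.length
  decreasing_by simp

-- hand port of zip(*lists) over char lists (star-zip: stops at the shortest list; zip() = [])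
def pvZipStar : List (List Char) → List (List Char)
  | [] => []
  | l0 :: rest =>
    if (l0 :: rest).any (·.isEmpty) then []
    else ((l0 :: rest).map (·.headI)) :: pvZipStar ((l0 :: rest).map List.tail)
  termination_by ls => ls.headI.length
  decreasing_by
    rename_i h
    simp [List.isEmpty_iff] at h ⊢
    cases l0 with
    | nil => exact absurd rfl h.1
    | cons a t => simp

def split_len (seq : List Char) (kmerlength : Int) : List String :=
  (pvZipStar ((PySem.List.pyRange 0 kmerlength 1).map
      (fun z => pvEveryK (PySem.List.slice seq (some z) none) kmerlength.toNat))).map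
    (fun x => String.ofList x)

-- kmerIndexMap.get(kmer) is None for a missing key, which Python's " ".join then rejects
-- (TypeError); Pre_ guarantees every looked-up kmer is present, so getD "" is exact there.
def seqToNewtokens (line : String) (kmerIndexMap : List (String × String)) (kmersize : Int) : String :=
  let cs := (PySem.Str.lower line).toList
  let sentences : List String :=
    if cs.length > 0 then
      let s1 := (split_len cs kmersize).foldl
        (fun acc kmer => if !(PySem.Str.isIn "n" kmer) then
            acc ++ [PySem.Dict.getD (PySem.Dict.mk kmerIndexMap) kmer ""] else acc) []
      (PySem.List.pyRange 1 kmersize 1).foldl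
        (fun acc n => (split_len (PySem.List.slice cs (some n) none) kmersize).foldl
          (fun acc kmer => if !(PySem.Str.isIn "n" kmer) then
              acc ++ [PySem.Dict.getD (PySem.Dict.mk kmerIndexMap) kmer ""] else acc) acc) s1
    else []   -- Python: 'sentences' is undefined here (NameError); Pre_ excludes the empty line
  if sentences = [] then "" else PySem.Str.join " " sentences

-- ===== PORT B =====

def seqToNewtokens_alt (line : String) (kmerIndexMap : List (String × String)) (kmersize : Int) : String :=
  let cs := (PySem.Str.lower line).toList
  let sentences : List String :=
    if cs.length > 0 then
      if 1 ≤ kmersize then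
        -- buckets = [[] for _ in range(kmersize)]
        let buckets : List (List String) := List.replicate kmersize.toNat []
        -- for i in range(len(line) - kmersize + 1): one sliding-window pass
        let buckets := (PySem.List.pyRange 0 ((cs.length : Int) - kmersize + 1) 1).foldl
          (fun bks i =>
            let kmer := PySem.List.slice cs (some i) (some (i + kmersize))
            if !(PySem.Chars.isIn ['n'] kmer) then
              -- buckets[i % kmersize].append(kmerIndexMap.get(kmer)); getD "" exact under Pre_
              bks.modify (PySem.Int.mod i kmersize).toNat
                (fun b => b ++ [PySem.Dict.getD (PySem.Dict.mk kmerIndexMap) (String.ofList kmer) ""])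
            else bks) buckets
        buckets.foldl (fun acc b => acc ++ b) []
      else []   -- no k-mers of non-positive size
    else []   -- Python: 'sentences' is undefined here (NameError); Pre_ excludes the empty line
  if sentences = [] then "" else PySem.Str.join " " sentences

-- ===== PRECONDITION & SPEC =====

-- Pre_ excludes exactly the inputs on which Python A raises: the empty line (NameError:
-- 'sentences' referenced before assignment) and any line one of whose lowercase k-windows
-- without an 'n' is missing from kmerIndexMap (dict.get gives None, " ".join raises TypeError).
def Pre_seqToNewtokens (line : String) (kmerIndexMap : List (String × String)) (kmersize : Int) : Prop :=
  line.toList ≠ [] ∧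
  (1 ≤ kmersize → ∀ i ∈ List.range line.toList.length,
    (i : Int) + kmersize ≤ (line.toList.length : Int) →
    PySem.Chars.isIn ['n'] (((PySem.Str.lower line).toList.drop i).take kmersize.toNat) = false →
    (PySem.Dict.get? (PySem.Dict.mk kmerIndexMap)
        (String.ofList (((PySem.Str.lower line).toList.drop i).take kmersize.toNat))).isSome = true)
instance (line : String) (kmerIndexMap : List (String × String)) (kmersize : Int) : Decidable (Pre_seqToNewtokens line kmerIndexMap kmersize) := by unfold Pre_seqToNewtokens; infer_instance

def pvWitness_seqToNewtokens : String × (List (String × String)) × Int :=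
  ("acg", [("ac", "7"), ("cg", "12")], 2)

def Spec_seqToNewtokens (line : String) (kmerIndexMap : List (String × String)) (kmersize : Int) (out : String) : Prop := out = seqToNewtokens_alt line kmerIndexMap kmersize
instance (line : String) (kmerIndexMap : List (String × String)) (kmersize : Int) (out : String) : Decidable (Spec_seqToNewtokens line kmerIndexMap kmersize out) := by unfold Spec_seqToNewtokens; infer_instance

-- ===== CLAIM (what is proved, stated in full; the proofs are below) =====
def Claim_equal_seqToNewtokens : Prop := ∀ (line : String) (kmerIndexMap : List (String × String)) (kmersize : Int), Dom_seqToNewtokens line kmerIndexMap kmersize → Pre_seqToNewtokens line kmerIndexMap kmersize → Spec_seqToNewtokens line kmerIndexMap kmersize (seqToNewtokens line kmerIndexMap kmersize)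

-- ===== LEMMAS AND PROOFS =====

-- the token appended for one window, and the tokens of a window list
def pvTok (m : List (String × String)) (w : List Char) : String :=
  PySem.Dict.getD (PySem.Dict.mk m) (String.ofList w) ""

def pvToks (m : List (String × String)) (ws : List (List Char)) : List String :=
  (ws.filter (fun w => !(PySem.Chars.isIn ['n'] w))).map (pvTok m)

-- consecutive K-chunks of l (complete chunks only) — what split_len computes
def pvChunks (l : List Char) (K : Nat) : List (List Char) :=
  if _h : K = 0 ∨ l.length < K then [] else (l.take K) :: pvChunks (l.drop K) K
  termination_by l.length
  decreasing_by simp; omega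

-- windows of l starting at r, r+K, r+2K, … as long as the start is < m (K-strided positions below m)
def pvWins (l : List Char) (K r m : Nat) : List (List Char) :=
  if _h : K = 0 ∨ m ≤ r then [] else ((l.drop r).take K) :: pvWins l K (r + K) m
  termination_by m - r
  decreasing_by omega

theorem pvChunks_eq_wins' (K : Nat) (hK : K ≠ 0) :
    ∀ (n : Nat) (l : List Char) (r : Nat), l.length - r ≤ n →
      pvChunks (l.drop r) K = pvWins l K r (l.length + 1 - K) := by
  intro n
  induction n with
  | zero =>
    intro l r h
    rw [pvChunks, pvWins]
    rw [dif_pos (by simp; omega), dif_pos (by omega)]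
  | succ n ih =>
    intro l r h
    rw [pvChunks, pvWins]
    by_cases hc : l.length - r < K
    · rw [dif_pos (by simp; omega), dif_pos (by omega)]
    · rw [dif_neg (by simp; omega), dif_neg (by omega)]
      rw [List.drop_drop]
      rw [ih l (r + K) (by omega)]
theorem zipStar_of_mem_nil (ls : List (List Char)) (h : [] ∈ ls) : pvZipStar ls = [] := by
  cases ls with
  | nil => simp at h
  | cons a t =>
    rw [pvZipStar, if_pos]
    simp only [List.any_eq_true]
    exact ⟨[], h, rfl⟩

theorem zipStar_cons_shape (ls : List (List Char)) (h1 : ls ≠ []) (h2 : ∀ x ∈ ls, x ≠ []) :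
    pvZipStar ls = (ls.map (·.headI)) :: pvZipStar (ls.map List.tail) := by
  cases ls with
  | nil => exact absurd rfl h1
  | cons a t =>
    rw [pvZipStar, if_neg]
    simp only [List.any_eq_true, List.isEmpty_iff, not_exists, not_and]
    intro x hx
    exact h2 x hx

theorem everyK_drop (l : List Char) (z K : Nat) (hz : z < l.length) (hK : 1 ≤ K) :
    pvEveryK (l.drop z) K = l[z] :: pvEveryK ((l.drop K).drop z) K := by
  rw [List.drop_eq_getElem_cons hz, pvEveryK, List.drop_drop, List.drop_drop,
    show z + 1 + (K - 1) = K + z from by omega]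

theorem range_map_headI (l : List Char) (K : Nat) (hK : K ≤ l.length) :
    (List.range K).map (fun z => (l.drop z).headI) = l.take K := by
  induction K with
  | zero => simp
  | succ K ih =>
    rw [List.range_succ, List.map_append, ih (by omega)]
    simp only [List.map_cons, List.map_nil]
    have hKl : K < l.length := by omega
    have hhead : (List.drop K l).headI = l[K] := by
      rw [List.drop_eq_getElem_cons hKl]; rfl
    rw [List.take_add_one, List.getElem?_eq_getElem hKl, hhead]
    simp

theorem zipStar_eq_chunks (K : Nat) (hK : K ≠ 0) :
    ∀ (n : Nat) (l : List Char), l.length ≤ n →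
      pvZipStar ((List.range K).map (fun z => pvEveryK (l.drop z) K)) = pvChunks l K := by
  intro n
  induction n with
  | zero =>
    intro l h
    have hl : l = [] := by cases l <;> simp_all
    subst hl
    rw [pvChunks, dif_pos (by omega)]
    apply zipStar_of_mem_nil
    simp only [List.mem_map]
    exact ⟨0, by simpa using Nat.pos_of_ne_zero hK, by simp [pvEveryK]⟩
  | succ n ih =>
    intro l h
    by_cases hlen : l.length < K
    · rw [pvChunks, dif_pos (by omega)]
      apply zipStar_of_mem_nil
      simp only [List.mem_map]
      exact ⟨l.length, by simpa using hlen, by simp [pvEveryK]⟩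
    · replace hlen : K ≤ l.length := by omega
      rw [zipStar_cons_shape]
      · rw [List.map_map, List.map_map]
        have hheads : (List.range K).map ((fun x => x.headI) ∘ (fun z => pvEveryK (l.drop z) K))
            = l.take K := by
          rw [← range_map_headI l K hlen]
          apply List.map_congr_left
          intro z hz
          simp only [List.mem_range] at hz
          simp only [Function.comp]
          rw [everyK_drop l z K (by omega) (by omega)]
          rw [List.drop_eq_getElem_cons (show z < l.length by omega)]
          rfl
        have htails : (List.range K).map (List.tail ∘ (fun z => pvEveryK (l.drop z) K))
            = (List.range K).map (fun z => pvEveryK ((l.drop K).drop z) K) := by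
          apply List.map_congr_left
          intro z hz
          simp only [List.mem_range] at hz
          simp only [Function.comp]
          rw [everyK_drop l z K (by omega) (by omega)]
          rfl
        rw [hheads, htails, ih (l.drop K) (by rw [List.length_drop]; omega)]
        conv_rhs => rw [pvChunks]
        rw [dif_neg (by omega)]
      · simp only [ne_eq, List.map_eq_nil_iff, List.range_eq_nil]
        exact hK
      · intro x hx
        simp only [List.mem_map, List.mem_range] at hx
        obtain ⟨z, hz, rfl⟩ := hx
        rw [everyK_drop l z K (by omega) (by omega)]
        simp
theorem zipStar_nil : pvZipStar [] = [] := by rw [pvZipStar]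

theorem split_len_eq_chunks' (l : List Char) (k : Int) :
    split_len l k = (pvChunks l k.toNat).map String.ofList := by
  unfold split_len
  by_cases hk : 1 ≤ k
  · rw [PySem.List.pyRange_one, List.map_map]
    have h2 : ((fun z => pvEveryK (PySem.List.slice l (some z) none) k.toNat) ∘ fun j : Nat => (0:Int) + j)
        = fun j : Nat => pvEveryK (l.drop j) k.toNat := by
      funext j
      simp only [Function.comp, zero_add]
      rw [PySem.List.slice_from l (by positivity)]
      simp
    rw [h2, show (k - 0).toNat = k.toNat from by omega]
    rw [zipStar_eq_chunks k.toNat (by omega) l.length l (le_refl _)]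
  · rw [PySem.List.pyRange_one_eq_nil (by omega)]
    simp only [List.map_nil]
    rw [pvChunks, dif_pos (by omega), zipStar_nil]
theorem inner_fold_eq (m : List (String × String)) (k : Int) (acc : List String) (d : List Char) :
    (split_len d k).foldl
      (fun acc kmer => if !(PySem.Str.isIn "n" kmer) then
          acc ++ [PySem.Dict.getD (PySem.Dict.mk m) kmer ""] else acc) acc
    = acc ++ pvToks m (pvChunks d k.toNat) := by
  rw [PySem.List.foldl_append_if (fun kmer => !(PySem.Str.isIn "n" kmer))
    (fun kmer => PySem.Dict.getD (PySem.Dict.mk m) kmer "") (split_len d k) acc]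
  rw [split_len_eq_chunks', List.filter_map, List.map_map]
  unfold pvToks pvTok
  have hfil : ((fun kmer => !(PySem.Str.isIn "n" kmer)) ∘ String.ofList)
      = (fun w : List Char => !(PySem.Chars.isIn ['n'] w)) := by
    funext w
    simp [PySem.Str.isIn_eq]
  rw [hfil]
  rfl

theorem sentencesA_eq' (m : List (String × String)) (l : List Char) (k : Int) (hk : 1 ≤ k) :
    ((PySem.List.pyRange 1 k 1).foldl
      (fun acc n => (split_len (PySem.List.slice l (some n) none) k).foldl
        (fun acc kmer => if !(PySem.Str.isIn "n" kmer) then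
            acc ++ [PySem.Dict.getD (PySem.Dict.mk m) kmer ""] else acc) acc)
      ((split_len l k).foldl
        (fun acc kmer => if !(PySem.Str.isIn "n" kmer) then
            acc ++ [PySem.Dict.getD (PySem.Dict.mk m) kmer ""] else acc) []))
    = ((List.range k.toNat).map
        (fun r => pvToks m (pvWins l k.toNat r (l.length + 1 - k.toNat)))).flatten := by
  rw [inner_fold_eq, List.nil_append]
  rw [PySem.List.foldl_congr_mem _ _
    (fun acc (n : Int) => acc ++ pvToks m (pvChunks (l.drop n.toNat) k.toNat)) _ ?_]
  swap
  · intro acc n hn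
    rw [PySem.List.mem_pyRange_one] at hn
    rw [PySem.List.slice_from l (by omega), inner_fold_eq]
  rw [PySem.List.foldl_append_eq_flatMap]
  rw [List.flatten_eq_flatMap, List.flatMap_map]
  -- turn chunks into wins
  have hKpos : k.toNat ≠ 0 := by omega
  have hchw : ∀ r : Nat, pvToks m (pvChunks (l.drop r) k.toNat)
      = pvToks m (pvWins l k.toNat r (l.length + 1 - k.toNat)) := fun r => by
    rw [pvChunks_eq_wins' k.toNat hKpos (l.length - r) l r (le_refl _)]
  obtain ⟨K1, hK1⟩ : ∃ K1, k.toNat = K1 + 1 := ⟨k.toNat - 1, by omega⟩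
  simp only [hK1] at hchw
  rw [hK1, List.range_succ_eq_map, List.flatMap_cons]
  rw [PySem.List.pyRange_one, List.flatMap_map, List.flatMap_map]
  rw [show (k - 1).toNat = K1 from by omega]
  congr 1
  · rw [← hchw 0, List.drop_zero]
    rfl
  · congr 1
    funext a
    simp only [id]
    rw [show ((1:Int) + (a:Int)).toNat = a + 1 from by omega, hchw (a + 1)]
-- one more window start extends pvWins exactly at the strided positions
theorem wins_succ (l : List Char) (K : Nat) (hK : K ≠ 0) :
    ∀ (n r M : Nat), M + 1 - r ≤ n →
      pvWins l K r (M + 1)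
        = pvWins l K r M ++ (if r ≤ M ∧ K ∣ (M - r) then [(l.drop M).take K] else []) := by
  intro n
  induction n with
  | zero =>
    intro r M h
    rw [pvWins, dif_pos (by omega), pvWins, dif_pos (by omega), if_neg (by omega)]
    rfl
  | succ n ih =>
    intro r M h
    by_cases h1 : M + 1 ≤ r
    · rw [pvWins, dif_pos (by omega), pvWins, dif_pos (by omega), if_neg (by omega)]
      rfl
    · by_cases h2 : r = M
      · subst h2
        rw [pvWins, dif_neg (by omega), pvWins, dif_pos (by omega), pvWins, dif_pos (by omega),
          if_pos ⟨le_refl r, by simp⟩]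
        rfl
      · -- r < M
        rw [pvWins, dif_neg (by omega), ih (r + K) M (by omega)]
        conv_rhs => rw [pvWins, dif_neg (by omega)]
        rw [List.cons_append]
        congr 1
        congr 1
        by_cases hd : r + K ≤ M ∧ K ∣ (M - (r + K))
        · rw [if_pos hd, if_pos]
          obtain ⟨hle, j, hj⟩ := hd
          refine ⟨by omega, ⟨j + 1, ?_⟩⟩
          rw [Nat.mul_add, Nat.mul_one]
          omega
        · rw [if_neg hd, if_neg]
          intro ⟨hle, j, hj⟩
          apply hd
          have hj1 : 1 ≤ j := by
            rcases Nat.eq_zero_or_pos j with h0 | h0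
            · subst h0; omega
            · omega
          obtain ⟨j', rfl⟩ : ∃ j', j = j' + 1 := ⟨j - 1, by omega⟩
          rw [Nat.mul_add, Nat.mul_one] at hj
          exact ⟨by omega, ⟨j', by omega⟩⟩

theorem strided_cond_iff (K r M : Nat) (_hK : K ≠ 0) (hr : r < K) :
    (r ≤ M ∧ K ∣ (M - r)) ↔ M % K = r := by
  constructor
  · rintro ⟨hle, j, hj⟩
    have hM : M = r + K * j := by omega
    rw [hM, Nat.add_mul_mod_self_left, Nat.mod_eq_of_lt hr]
  · intro hmod
    have h1 : M % K ≤ M := Nat.mod_le M K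
    have h2 : K * (M / K) + M % K = M := Nat.div_add_mod M K
    exact ⟨by omega, ⟨M / K, by omega⟩⟩
theorem toks_append_one (m : List (String × String)) (ws : List (List Char)) (w : List Char) :
    pvToks m (ws ++ [w])
      = pvToks m ws ++ (if !(PySem.Chars.isIn ['n'] w) then [pvTok m w] else []) := by
  unfold pvToks
  rw [List.filter_append, List.map_append]
  congr 1
  by_cases hw : PySem.Chars.isIn ['n'] w
  · rw [if_neg (by simp [hw])]
    simp [hw]
  · rw [if_pos (by simp [hw])]
    simp [hw]

theorem buckets_inv (m : List (String × String)) (l : List Char) (K : Nat) (hK : K ≠ 0) :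
    ∀ M : Nat,
      (List.range M).foldl
        (fun bks j => if !(PySem.Chars.isIn ['n'] ((l.drop j).take K)) then
            bks.modify (j % K)
              (fun b => b ++ [PySem.Dict.getD (PySem.Dict.mk m) (String.ofList ((l.drop j).take K)) ""])
          else bks)
        (List.replicate K [])
      = (List.range K).map (fun r => pvToks m (pvWins l K r M)) := by
  intro M
  induction M with
  | zero =>
    have hw : ∀ r : Nat, pvWins l K r 0 = [] := fun r => by rw [pvWins, dif_pos (by omega)]
    simp only [List.range_zero, List.foldl_nil, hw]
    unfold pvToks
    simp only [List.filter_nil, List.map_nil]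
    simp [List.map_const']
  | succ M ih =>
    rw [List.range_succ, List.foldl_append, ih, List.foldl_cons, List.foldl_nil]
    have hws : ∀ r, pvWins l K r (M + 1)
        = pvWins l K r M ++ (if r ≤ M ∧ K ∣ (M - r) then [(l.drop M).take K] else []) :=
      fun r => wins_succ l K hK (M + 1) r M (by omega)
    by_cases hin : PySem.Chars.isIn ['n'] ((l.drop M).take K)
    · rw [if_neg (by simp [hin])]
      apply List.map_congr_left
      intro r hr
      rw [hws r]
      by_cases hc : r ≤ M ∧ K ∣ (M - r)
      · rw [if_pos hc, toks_append_one]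
        simp [hin]
      · rw [if_neg hc]
        simp
    · rw [if_pos (by simp [hin])]
      apply List.ext_getElem
      · simp
      · intro j hj1 hj2
        simp only [List.length_modify, List.length_map, List.length_range] at hj1 hj2
        rw [List.getElem_modify]
        simp only [List.getElem_map, List.getElem_range]
        rw [hws j]
        by_cases hc : M % K = j
        · rw [if_pos hc, if_pos ((strided_cond_iff K j M hK hj1).mpr hc), toks_append_one]
          simp [hin, pvTok]
        · rw [if_neg hc, if_neg (fun h => hc ((strided_cond_iff K j M hK hj1).mp h)),
            List.append_nil]
theorem sentencesB_eq' (m : List (String × String)) (l : List Char) (k : Int) (hk : 1 ≤ k) :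
    ((PySem.List.pyRange 0 ((l.length : Int) - k + 1) 1).foldl
      (fun bks i =>
        if !(PySem.Chars.isIn ['n'] (PySem.List.slice l (some i) (some (i + k)))) then
          bks.modify (PySem.Int.mod i k).toNat
            (fun b => b ++ [PySem.Dict.getD (PySem.Dict.mk m)
              (String.ofList (PySem.List.slice l (some i) (some (i + k)))) ""])
        else bks) (List.replicate k.toNat [])).foldl (fun acc b => acc ++ b) []
    = ((List.range k.toNat).map
        (fun r => pvToks m (pvWins l k.toNat r (l.length + 1 - k.toNat)))).flatten := by
  have hkK : ((k.toNat : Int)) = k := by omega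
  rw [PySem.List.pyRange_one, List.foldl_map]
  rw [PySem.List.foldl_congr_mem _ _
    (fun bks (j : Nat) => if !(PySem.Chars.isIn ['n'] ((l.drop j).take k.toNat)) then
        bks.modify (j % k.toNat)
          (fun b => b ++ [PySem.Dict.getD (PySem.Dict.mk m)
            (String.ofList ((l.drop j).take k.toNat)) ""])
      else bks) _ ?_]
  swap
  · intro bks j hj
    simp only [zero_add]
    rw [← hkK, PySem.List.slice_natCast_add l j k.toNat, PySem.Int.mod_natCast]
    simp only [Int.toNat_natCast]
  rw [show (((l.length : Int) - k + 1) - 0).toNat = l.length + 1 - k.toNat from by omega]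
  rw [buckets_inv m l k.toNat (by omega) (l.length + 1 - k.toNat)]
  rw [PySem.List.foldl_append_eq_flatMap (fun b : List String => b), List.flatten_eq_flatMap]
  simp

-- ===== VERDICT (by name: the statement is the Claim_ definition above) =====
theorem seqToNewtokens_spec : Claim_equal_seqToNewtokens := by
  intro line m k _ hpre
  unfold Spec_seqToNewtokens seqToNewtokens seqToNewtokens_alt
  simp only []
  obtain ⟨hne, -⟩ := hpre
  have hlen0 : 0 < (PySem.Str.lower line).toList.length := by
    rw [PySem.Str.toList_lower]
    cases h : line.toList with
    | nil => exact absurd h hne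
    | cons c t => simp [PySem.Chars.lower]
  rw [if_pos hlen0, if_pos hlen0]
  by_cases hk : 1 ≤ k
  · rw [if_pos hk]
    rw [sentencesA_eq' m _ k hk, sentencesB_eq' m _ k hk]
  · rw [if_neg hk]
    rw [PySem.List.pyRange_one_eq_nil (show k ≤ 1 from by omega)]
    simp only [List.foldl_nil]
    rw [inner_fold_eq, pvChunks, dif_pos (by omega)]
    simp [pvToks]
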